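-- pv_equiv track=rewrite | github.com/qwertyuichi/multilingual_scriptor | transcriber.py | clean_hallucination
-- ===== SOURCE A (Python) =====
-- def clean_hallucination(text: str, max_repeat: int = 8) -> str:
--     """出力されたテキストの簡易クレンジング。
--
--     - 同一文字が *max_repeat* を超えて連続する場合は切り詰め
--     - 30 文字以上の連続ブロック(空白区切り) があれば先頭を残し警告タグ付与
--     """
--     if not text:
--         return text
--     cleaned: list[str] = []
--     prev = ''
--     count = 0
--     for ch in text:
--         if ch == prev:
--             count += 1
--             if count <= max_repeat:
--                 cleaned.append(ch)
--         else:
--             prev = ch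
--             count = 1
--             cleaned.append(ch)
--     out = ''.join(cleaned)
--     if any(len(block) >= 30 for block in out.split()):
--         return '[HALLUCINATION?] ' + out[:120]
--     return out
-- ===== SOURCE B (Python) =====
-- def clean_hallucination(text: str, max_repeat: int = 8) -> str:
--     """Run-oriented rewrite: walks maximal runs of identical characters and
--     emits each run truncated to max_repeat (but at least one character),
--     then applies the same long-block warning check."""
--     pieces = []
--     i, n = 0, len(text)
--     while i < n:
--         j = i
--         while j < n and text[j] == text[i]:
--             j += 1
--         pieces.append(text[i] * max(1, min(j - i, max_repeat)))
--         i = j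
--     out = ''.join(pieces)
--     if any(len(block) >= 30 for block in out.split()):
--         return '[HALLUCINATION?] ' + out[:120]
--     return out
-- ===== Notes on version B (the rewrite author's own statement) =====
-- stated objective: alternative
-- what changed: B walks maximal runs of identical characters (inner scan per run) and emits each run truncated via max(1, min(run_len, max_repeat)) in one step, instead of A's per-character prev/count accumulator with conditional appends.
import Mathlib
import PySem

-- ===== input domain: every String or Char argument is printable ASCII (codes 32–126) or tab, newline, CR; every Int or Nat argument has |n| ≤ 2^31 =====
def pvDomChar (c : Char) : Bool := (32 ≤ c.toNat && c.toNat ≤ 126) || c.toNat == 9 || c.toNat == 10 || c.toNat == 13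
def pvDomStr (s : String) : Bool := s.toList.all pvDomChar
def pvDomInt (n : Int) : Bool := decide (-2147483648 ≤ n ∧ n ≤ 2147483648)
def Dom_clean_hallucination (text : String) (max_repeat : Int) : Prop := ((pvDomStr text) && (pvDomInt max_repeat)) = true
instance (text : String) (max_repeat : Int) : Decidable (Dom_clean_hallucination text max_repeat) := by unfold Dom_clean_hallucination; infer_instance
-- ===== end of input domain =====

-- B replaces A's per-character prev/count accumulator by a walk over maximal runs,
-- emitting each run truncated from its length in one step (objective: alternative decomposition, same cost).

-- ===== PORT A =====
-- one step of A's for-loop: state (cleaned, prev, count); prev = '' is ported as Option.none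
def chStep (max_repeat : Int) (st : List Char × Option Char × Int) (ch : Char) :
    List Char × Option Char × Int :=
  match st with
  | (cleaned, prev, count) =>
    if some ch = prev then
      let count := count + 1
      (if count ≤ max_repeat then cleaned ++ [ch] else cleaned, prev, count)
    else
      (cleaned ++ [ch], some ch, 1)

def clean_hallucination (text : String) (max_repeat : Int) : String :=
  if text = "" then text
  else
    let r := text.toList.foldl (chStep max_repeat) ([], none, 0)
    let out := r.1
    if (PySem.Chars.split₀ out).any (fun block => decide (30 ≤ block.length)) then
      String.ofList ("[HALLUCINATION?] ".toList ++ PySem.Chars.slice out none (some 120))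
    else
      String.ofList out

-- ===== PORT B =====
-- Source B's outer while-loop: consume one maximal run (the inner while = takeWhile/dropWhile scan) per step
def runBuild (max_repeat : Int) : List Char → List Char
  | [] => []
  | c :: cs =>
    let run := cs.takeWhile (· == c)
    List.replicate (max 1 (min ((run.length : Int) + 1) max_repeat)).toNat c
      ++ runBuild max_repeat (cs.dropWhile (· == c))
termination_by l => l.length
decreasing_by
  simpa using Nat.lt_succ_of_le (List.length_dropWhile_le _ cs)

def clean_hallucination_alt (text : String) (max_repeat : Int) : String :=
  let out := runBuild max_repeat text.toList
  if (PySem.Chars.split₀ out).any (fun block => decide (30 ≤ block.length)) then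
    String.ofList ("[HALLUCINATION?] ".toList ++ PySem.Chars.slice out none (some 120))
  else
    String.ofList out

-- ===== PRECONDITION & SPEC =====
def Spec_clean_hallucination (text : String) (max_repeat : Int) (out : String) : Prop := out = clean_hallucination_alt text max_repeat
instance (text : String) (max_repeat : Int) (out : String) : Decidable (Spec_clean_hallucination text max_repeat out) := by unfold Spec_clean_hallucination; infer_instance

-- ===== CLAIM (what is proved, stated in full; the proofs are below) =====
def Claim_equal_clean_hallucination : Prop := ∀ (text : String) (max_repeat : Int), Dom_clean_hallucination text max_repeat → Spec_clean_hallucination text max_repeat (clean_hallucination text max_repeat)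

-- ===== LEMMAS AND PROOFS =====

-- processing a run of k further copies of c from count cnt appends exactly
-- the copies whose running count stays ≤ m
theorem chStep_run (m : Int) (c : Char) (k : Nat) :
    ∀ (acc : List Char) (cnt : Int),
      (List.replicate k c).foldl (chStep m) (acc, some c, cnt) =
        (acc ++ List.replicate (min (cnt + k) m - cnt).toNat c, some c, cnt + k) := by
  induction k with
  | zero => intro acc cnt; simp
  | succ k ih =>
    intro acc cnt
    rw [List.replicate_succ, List.foldl_cons]
    show (List.replicate k c).foldl (chStep m) (chStep m (acc, some c, cnt) c) = _
    simp only [chStep, if_true]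
    by_cases h : cnt + 1 ≤ m
    · rw [if_pos h, ih]
      refine Prod.ext ?_ (Prod.ext rfl (by push_cast; ring))
      show (acc ++ [c]) ++ _ = acc ++ _
      rw [List.append_assoc]
      congr 1
      rw [List.singleton_append, ← List.replicate_succ]
      congr 1
      omega
    · rw [if_neg h, ih]
      refine Prod.ext ?_ (Prod.ext rfl (by push_cast; ring))
      show acc ++ _ = acc ++ _
      congr 2
      omega

theorem dropWhile_cons_not (cs xs : List Char) (q : Char → Bool) (x : Char)
    (h : cs.dropWhile q = x :: xs) : q x = false := by
  have h2 : ((cs.dropWhile q).head (by simp [h])) = x := by simp [h]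
  have := List.head_dropWhile_not q (l := cs) (w := by simp [h])
  rwa [h2] at this

-- the fold of A's loop, started at a state whose prev does not match the next
-- character, produces exactly B's run-built output appended to the accumulator
theorem fold_eq_runBuild_aux (m : Int) :
    ∀ (n : Nat) (l : List Char), l.length ≤ n →
      ∀ (acc : List Char) (p : Option Char) (cnt : Int),
      (∀ c cs, l = c :: cs → p ≠ some c) →
      (l.foldl (chStep m) (acc, p, cnt)).1 = acc ++ runBuild m l := by
  intro n
  induction n with
  | zero =>
    intro l hl acc p cnt _
    have : l = [] := List.eq_nil_of_length_eq_zero (Nat.le_zero.mp hl)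
    subst this; simp [runBuild]
  | succ n ih =>
    intro l hl acc p cnt hp
    match l with
    | [] => simp [runBuild]
    | c :: cs =>
      rw [List.foldl_cons]
      have hne : ¬ (some c = p) := fun h => (hp c cs rfl) h.symm
      simp only [chStep, if_neg hne]
      have htw : cs.takeWhile (· == c) = List.replicate (cs.takeWhile (· == c)).length c := by
        refine List.eq_replicate_of_mem (fun b hb => ?_)
        simpa using List.mem_takeWhile_imp hb
      have hsplit : cs = cs.takeWhile (· == c) ++ cs.dropWhile (· == c) :=
        (List.takeWhile_append_dropWhile).symm
      set t := (cs.takeWhile (· == c)).length with ht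
      rw [show cs.foldl (chStep m) (acc ++ [c], some c, 1)
            = (cs.takeWhile (· == c) ++ cs.dropWhile (· == c)).foldl
                (chStep m) (acc ++ [c], some c, 1) by rw [← hsplit]]
      rw [List.foldl_append, htw, chStep_run]
      have hdrop : ((cs.dropWhile (· == c)).foldl (chStep m)
            (acc ++ [c] ++ List.replicate (min (1 + (t : Int)) m - 1).toNat c, some c,
              1 + t)).1
          = (acc ++ [c] ++ List.replicate (min (1 + (t : Int)) m - 1).toNat c)
            ++ runBuild m (cs.dropWhile (· == c)) := by
        refine ih _ ?_ _ _ _ ?_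
        · calc (cs.dropWhile (· == c)).length ≤ cs.length := List.length_dropWhile_le _ cs
            _ ≤ n := by simpa using Nat.succ_le_succ_iff.mp hl
        · intro d ds hd h
          have : (d == c) = false := dropWhile_cons_not cs ds _ d hd
          have hdc : d = c := by injection h with h'; exact h'.symm
          simp [hdc] at this
      rw [hdrop]
      show _ = acc ++ runBuild m (c :: cs)
      rw [runBuild]
      simp only [← ht, List.append_assoc]
      congr 1
      rw [← List.append_assoc]
      congr 1
      rw [List.singleton_append, ← List.replicate_succ]
      congr 1
      omega

theorem fold_eq_runBuild (m : Int) (l acc : List Char) (p : Option Char) (cnt : Int)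
    (hp : ∀ c cs, l = c :: cs → p ≠ some c) :
    (l.foldl (chStep m) (acc, p, cnt)).1 = acc ++ runBuild m l :=
  fold_eq_runBuild_aux m l.length l le_rfl acc p cnt hp

theorem main_eq (text : String) (m : Int) :
    clean_hallucination text m = clean_hallucination_alt text m := by
  unfold clean_hallucination clean_hallucination_alt
  by_cases h : text = ""
  · subst h
    have h1 : runBuild m ("".toList) = [] := by simp [runBuild]
    simp only [h1]
    rfl
  · rw [if_neg h]
    have := fold_eq_runBuild m text.toList [] none 0 (by intro c cs _ hc; simp at hc)
    simp only [List.nil_append] at this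
    simp only [this]

-- ===== VERDICT (by name: the statement is the Claim_ definition above) =====
theorem clean_hallucination_spec : Claim_equal_clean_hallucination := by
  intro text m _
  exact main_eq text m
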